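-- pv_equiv track=rewrite | github.com/shusheng123/shell_code | history_utils.py | filter_prefix_cmds
-- ===== SOURCE A (Python) =====
-- def filter_prefix_cmds(cmds, min_len=8):
--     # 先按长度降序排列
--     cmds = sorted([c for c in cmds if len(c) >= min_len], key=lambda x: -len(x))
--     result = []
--     for i, cmd in enumerate(cmds):
--         is_prefix = False
--         for j, other in enumerate(cmds):
--             if i != j and other.startswith(cmd):
--                 is_prefix = True
--                 break
--         if not is_prefix:
--             result.append(cmd)
--     return result
-- ===== SOURCE B (Python) =====
-- def filter_prefix_cmds(cmds, min_len=8):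
--     pool = sorted([c for c in cmds if len(c) >= min_len], key=lambda x: -len(x))
--     counts = {}
--     for c in pool:
--         counts[c] = counts.get(c, 0) + 1
--     proper_prefixes = set()
--     for c in pool:
--         for k in range(len(c)):
--             proper_prefixes.add(c[:k])
--     return [c for c in pool if counts[c] == 1 and c not in proper_prefixes]
-- ===== Notes on version B (the rewrite author's own statement) =====
-- stated objective: alternative
-- what changed: Replaces the quadratic all-pairs startswith scan by a multiplicity dict plus a hash set of all proper prefixes built in one pass, then a single filter over the sorted pool.
import Mathlib
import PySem

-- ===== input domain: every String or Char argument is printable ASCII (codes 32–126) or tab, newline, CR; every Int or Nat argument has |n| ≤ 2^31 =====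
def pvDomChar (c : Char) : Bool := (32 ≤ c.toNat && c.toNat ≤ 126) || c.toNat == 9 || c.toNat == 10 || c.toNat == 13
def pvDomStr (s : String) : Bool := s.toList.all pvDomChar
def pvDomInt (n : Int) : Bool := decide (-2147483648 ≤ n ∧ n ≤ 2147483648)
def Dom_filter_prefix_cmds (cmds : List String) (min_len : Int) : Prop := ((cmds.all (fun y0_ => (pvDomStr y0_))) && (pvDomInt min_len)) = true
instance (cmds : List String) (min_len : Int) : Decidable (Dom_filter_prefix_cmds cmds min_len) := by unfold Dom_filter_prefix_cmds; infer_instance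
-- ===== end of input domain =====

-- B replaces A's all-pairs startswith scan by a multiplicity dict plus a hash set of all proper prefixes, built in one pass, then a single filter (alternative algorithm, same observable result).

-- ===== PORT A =====
def filter_prefix_cmds (cmds : List String) (min_len : Int) : List String :=
  let cmds' := PySem.List.sorted (cmds.filter (fun c => decide (min_len ≤ PySem.Str.len c))) (fun x => -(PySem.Str.len x)) false
  (PySem.List.enumerate cmds' 0).foldl (fun result p =>
    let is_prefix := (PySem.List.enumerate cmds' 0).any (fun q => (p.1 != q.1) && PySem.Str.startswith q.2 p.2)
    if !is_prefix then result ++ [p.2] else result) []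

-- ===== PORT B =====
def filter_prefix_cmds_alt (cmds : List String) (min_len : Int) : List String :=
  let pool := PySem.List.sorted (cmds.filter (fun c => decide (min_len ≤ PySem.Str.len c))) (fun x => -(PySem.Str.len x)) false
  let counts : PySem.Dict String Int := pool.foldl (fun d c => d.modify c 0 (· + 1)) PySem.Dict.empty
  let prefixes : PySem.Set String := pool.foldl (fun s c =>
      (PySem.List.pyRange 0 (PySem.Str.len c) 1).foldl (fun s k => PySem.Set.add s (PySem.Str.slice c none (some k))) s)
    PySem.Set.empty
  pool.filter (fun c => (counts.getD c 0 == 1) && !(PySem.Set.contains prefixes c))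

-- ===== PRECONDITION & SPEC =====
def Spec_filter_prefix_cmds (cmds : List String) (min_len : Int) (out : List String) : Prop := out = filter_prefix_cmds_alt cmds min_len
instance (cmds : List String) (min_len : Int) (out : List String) : Decidable (Spec_filter_prefix_cmds cmds min_len out) := by unfold Spec_filter_prefix_cmds; infer_instance

-- ===== CLAIM (what is proved, stated in full; the proofs are below) =====
def Claim_equal_filter_prefix_cmds : Prop := ∀ (cmds : List String) (min_len : Int), Dom_filter_prefix_cmds cmds min_len → Spec_filter_prefix_cmds cmds min_len (filter_prefix_cmds cmds min_len)

-- ===== LEMMAS AND PROOFS =====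

-- "c is a proper prefix of some element of L"
def pvProper (L : List String) (c : String) : Prop := ∃ t ∈ L, c.toList <+: t.toList ∧ c ≠ t

-- membership in B's prefix set
theorem pv_mem_prefixes (L : List String) (s0 : PySem.Set String) (c : String) :
    c ∈ L.foldl (fun s t =>
        (PySem.List.pyRange 0 (PySem.Str.len t) 1).foldl (fun s k => PySem.Set.add s (PySem.Str.slice t none (some k))) s) s0
      ↔ c ∈ s0 ∨ ∃ t ∈ L, ∃ k, k ∈ PySem.List.pyRange 0 (PySem.Str.len t) 1 ∧ c = PySem.Str.slice t none (some k) := by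
  induction L generalizing s0 with
  | nil => simp
  | cons t L ih =>
    simp only [List.foldl_cons, ih, PySem.Set.mem_foldl_add]
    constructor
    · rintro (⟨h | ⟨k, hk, rfl⟩⟩ | ⟨u, hu, k, hk, rfl⟩)
      · exact Or.inl h
      · exact Or.inr ⟨t, by simp, k, hk, rfl⟩
      · exact Or.inr ⟨u, by simp [hu], k, hk, rfl⟩
    · rintro (h | ⟨u, hu, k, hk, rfl⟩)
      · exact Or.inl (Or.inl h)
      · rcases List.mem_cons.mp hu with rfl | hu
        · exact Or.inl (Or.inr ⟨k, hk, rfl⟩)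
        · exact Or.inr ⟨u, hu, k, hk, rfl⟩

theorem pv_len_eq (s : String) : PySem.Str.len s = (s.toList.length : Int) := by
  simp [PySem.Str.len_eq]

-- a slice t[:k], 0 ≤ k < len t, is exactly a proper prefix of t
theorem pv_slice_iff_proper (t c : String) :
    (∃ k, k ∈ PySem.List.pyRange 0 (PySem.Str.len t) 1 ∧ c = PySem.Str.slice t none (some k))
      ↔ (c.toList <+: t.toList ∧ c ≠ t) := by
  constructor
  · rintro ⟨k, hk, rfl⟩
    rw [PySem.List.mem_pyRange_one, pv_len_eq] at hk
    obtain ⟨hk0, hklt⟩ := hk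
    have htl : (PySem.Str.slice t none (some k)).toList = t.toList.take k.toNat := by
      rw [PySem.Str.toList_slice, PySem.Chars.slice_eq_listSlice, PySem.List.slice_to _ hk0]
    refine ⟨?_, ?_⟩
    · rw [htl]; exact List.take_prefix _ _
    · intro h
      have h2 : t.toList.take k.toNat = t.toList := by rw [← htl, h]
      have h3 := congrArg List.length h2
      rw [List.length_take] at h3
      omega
  · rintro ⟨hpre, hne⟩
    have hle := hpre.length_le
    have hlt : c.toList.length < t.toList.length := by
      rcases Nat.lt_or_ge c.toList.length t.toList.length with h | h
      · exact h
      · exact absurd (String.ext (hpre.eq_of_length (by omega))) hne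
    refine ⟨(c.toList.length : Int), ?_, ?_⟩
    · rw [PySem.List.mem_pyRange_one, pv_len_eq]
      exact ⟨Int.natCast_nonneg _, by exact_mod_cast hlt⟩
    · apply String.ext
      rw [PySem.Str.toList_slice, PySem.Chars.slice_eq_listSlice,
        PySem.List.slice_to _ (Int.natCast_nonneg _), Int.toNat_natCast]
      exact List.prefix_iff_eq_take.mp hpre

-- L with the k-th element removed, as a permutation
theorem pv_perm_eraseIdx (L : List String) (k : Nat) (hk : k < L.length) :
    L.Perm (L[k] :: L.eraseIdx k) := by
  have h2 : L[k] :: L.drop (k + 1) = L.drop k := List.getElem_cons_drop hk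
  rw [List.eraseIdx_eq_take_drop_succ]
  conv_lhs => rw [← List.take_append_drop k L, ← h2]
  exact List.perm_middle

-- the heart: A's "some OTHER index has cmd as a prefix" ↔ B's "duplicate or proper prefix"
theorem pv_other_iff (L : List String) (k : Nat) (hk : k < L.length) :
    (∃ j, ∃ hj : j < L.length, j ≠ k ∧ L[k].toList <+: L[j].toList)
      ↔ 2 ≤ List.count L[k] L ∨ pvProper L L[k] := by
  set c := L[k] with hc
  have hperm := pv_perm_eraseIdx L k hk
  have hcount : List.count c L = List.count c (L.eraseIdx k) + 1 := by
    rw [hperm.count_eq, List.count_cons_self]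
  have hmemM : ∀ t : String, t ∈ L.eraseIdx k ↔ ∃ j, ∃ hj : j < L.length, j ≠ k ∧ L[j] = t := by
    intro t; exact List.mem_eraseIdx_iff_getElem
  constructor
  · rintro ⟨j, hj, hne, hpre⟩
    by_cases h : L[j] = c
    · left
      have hm : c ∈ L.eraseIdx k := (hmemM c).mpr ⟨j, hj, hne, h⟩
      have := List.count_pos_iff.mpr hm
      omega
    · right
      exact ⟨L[j], List.getElem_mem hj, hpre, fun he => h he.symm⟩
  · rintro (h | ⟨t, ht, hpre, hne⟩)
    · have hm : c ∈ L.eraseIdx k := List.count_pos_iff.mp (by omega)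
      rcases (hmemM c).mp hm with ⟨j, hj, hne, he⟩
      exact ⟨j, hj, hne, by rw [he]⟩
    · have htM : t ∈ L.eraseIdx k := by
        rcases List.mem_cons.mp (hperm.mem_iff.mp ht) with rfl | h
        · exact absurd rfl hne.symm
        · exact h
      rcases (hmemM t).mp htM with ⟨j, hj, hne', he⟩
      exact ⟨j, hj, hne', by rw [he]; exact hpre⟩

-- filtering enumerate by an index predicate that agrees with a value predicate
theorem pv_filter_enum_map {α : Type} (xs : List α) (s : Int) (q : Int × α → Bool) (p : α → Bool)
    (h : ∀ k (hk : k < xs.length), q (s + (k : Int), xs[k]) = p xs[k]) :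
    ((PySem.List.enumerate xs s).filter q).map (·.2) = xs.filter p := by
  induction xs generalizing s with
  | nil => simp [PySem.List.enumerate_nil]
  | cons x xs ih =>
    rw [PySem.List.enumerate_cons]
    have h0 := h 0 (by simp)
    simp only [Nat.cast_zero, add_zero, List.getElem_cons_zero] at h0
    have htail : ((PySem.List.enumerate xs (s + 1)).filter q).map (·.2) = xs.filter p := by
      apply ih
      intro k hk
      have := h (k + 1) (by simpa using Nat.succ_lt_succ hk)
      simpa [add_assoc, add_comm, add_left_comm] using this
    cases hp : p x <;> simp [h0, hp, htail]

-- the pointwise agreement of A's per-index test with B's per-value test, on the same list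
theorem pv_pointwise (L : List String) (k : Nat) (hk : k < L.length) :
    (!((PySem.List.enumerate L 0).any (fun q => (((0 : Int) + (k : Int)) != q.1) && PySem.Str.startswith q.2 L[k])))
      = (((PySem.Dict.counter L).getD L[k] 0 == 1) && !(PySem.Set.contains
          (L.foldl (fun s t => (PySem.List.pyRange 0 (PySem.Str.len t) 1).foldl
            (fun s k => PySem.Set.add s (PySem.Str.slice t none (some k))) s) PySem.Set.empty) L[k])) := by
  have hany : ((PySem.List.enumerate L 0).any (fun q => (((0 : Int) + (k : Int)) != q.1) && PySem.Str.startswith q.2 L[k]) = true)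
      ↔ (2 ≤ List.count L[k] L ∨ pvProper L L[k]) := by
    rw [← pv_other_iff L k hk, List.any_eq_true]
    constructor
    · rintro ⟨q, hq, hqt⟩
      rcases (PySem.List.mem_enumerate_iff L 0 q).mp hq with ⟨j, hj, rfl⟩
      simp only [Bool.and_eq_true, bne_iff_ne, ne_eq] at hqt
      refine ⟨j, hj, ?_, ?_⟩
      · intro he; exact hqt.1 (by rw [he])
      · exact (PySem.Chars.startswith_iff _ _).mp (by rw [← PySem.Str.startswith_eq]; exact hqt.2)
    · rintro ⟨j, hj, hne, hpre⟩
      refine ⟨((0 : Int) + (j : Int), L[j]), (PySem.List.mem_enumerate_iff L 0 _).mpr ⟨j, hj, rfl⟩, ?_⟩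
      simp only [Bool.and_eq_true, bne_iff_ne, ne_eq]
      constructor
      · intro he
        have hkj : (k : Int) = (j : Int) := by omega
        exact hne (by exact_mod_cast hkj.symm)
      · rw [PySem.Str.startswith_eq]; exact (PySem.Chars.startswith_iff _ _).mpr hpre
  have hcnt : (((PySem.Dict.counter L).getD L[k] 0 == 1) = true) ↔ List.count L[k] L = 1 := by
    rw [PySem.Dict.getD_counter]
    constructor
    · intro h; have := beq_iff_eq.mp h; exact_mod_cast this
    · intro h; apply beq_iff_eq.mpr; exact_mod_cast h
  have hpref : (PySem.Set.contains
      (L.foldl (fun s t => (PySem.List.pyRange 0 (PySem.Str.len t) 1).foldl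
        (fun s k => PySem.Set.add s (PySem.Str.slice t none (some k))) s) PySem.Set.empty) L[k] = true)
      ↔ pvProper L L[k] := by
    rw [PySem.Set.contains_iff, pv_mem_prefixes]
    constructor
    · rintro (h | ⟨t, ht, hke⟩)
      · simp [PySem.Set.empty] at h
      · exact ⟨t, ht, (pv_slice_iff_proper t L[k]).mp hke⟩
    · rintro ⟨t, ht, hp⟩
      exact Or.inr ⟨t, ht, (pv_slice_iff_proper t L[k]).mpr hp⟩
  have hpos : 1 ≤ List.count L[k] L := List.count_pos_iff.mpr (List.getElem_mem hk)
  by_cases hD : 2 ≤ List.count L[k] L ∨ pvProper L L[k]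
  · have h1 : ((PySem.List.enumerate L 0).any (fun q => (((0 : Int) + (k : Int)) != q.1) && PySem.Str.startswith q.2 L[k])) = true := hany.mpr hD
    rw [h1, Bool.not_true]
    rcases hD with h | h
    · have hx : ((PySem.Dict.counter L).getD L[k] 0 == 1) = false := by
        rw [Bool.eq_false_iff]; intro hx; have := hcnt.mp hx; omega
      rw [hx, Bool.false_and]
    · have hy : (PySem.Set.contains _ L[k]) = true := hpref.mpr h
      rw [hy, Bool.not_true, Bool.and_false]
  · have hD' := not_or.mp hD
    have h1 : ((PySem.List.enumerate L 0).any (fun q => (((0 : Int) + (k : Int)) != q.1) && PySem.Str.startswith q.2 L[k])) = false := by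
      rw [Bool.eq_false_iff]; intro h; exact hD (hany.mp h)
    have hc1 : ((PySem.Dict.counter L).getD L[k] 0 == 1) = true := hcnt.mpr (by omega)
    have hp1 : (PySem.Set.contains (L.foldl (fun s t => (PySem.List.pyRange 0 (PySem.Str.len t) 1).foldl
        (fun s k => PySem.Set.add s (PySem.Str.slice t none (some k))) s) PySem.Set.empty) L[k]) = false := by
      rw [Bool.eq_false_iff]; intro h; exact hD'.2 (hpref.mp h)
    rw [h1, Bool.not_false, hc1, hp1, Bool.not_false, Bool.true_and]

-- A's loop over one fixed list L equals B's filter over the same L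
theorem pv_main (L : List String) :
    (PySem.List.enumerate L 0).foldl (fun result p =>
        if !((PySem.List.enumerate L 0).any fun q => p.1 != q.1 && PySem.Str.startswith q.2 p.2) then result ++ [p.2] else result) []
    = L.filter (fun c => (((PySem.Dict.counter L).getD c 0 == 1)) && !(PySem.Set.contains
        (L.foldl (fun s t => (PySem.List.pyRange 0 (PySem.Str.len t) 1).foldl
          (fun s k => PySem.Set.add s (PySem.Str.slice t none (some k))) s) PySem.Set.empty) c)) := by
  refine Eq.trans (PySem.List.foldl_append_if
      (fun p : Int × String => !((PySem.List.enumerate L 0).any fun q => p.1 != q.1 && PySem.Str.startswith q.2 p.2))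
      (fun p => p.2) (PySem.List.enumerate L 0) []) (Eq.trans (List.nil_append _) ?_)
  exact pv_filter_enum_map L 0 _ _ (fun k hk => pv_pointwise L k hk)

-- ===== VERDICT (by name: the statement is the Claim_ definition above) =====
theorem filter_prefix_cmds_spec : Claim_equal_filter_prefix_cmds := by
  intro cmds min_len _
  show filter_prefix_cmds cmds min_len = filter_prefix_cmds_alt cmds min_len
  exact pv_main (PySem.List.sorted (cmds.filter (fun c => decide (min_len ≤ PySem.Str.len c))) (fun x => -(PySem.Str.len x)) false)
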